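-- pv_equiv track=rewrite | github.com/lankmiler/algorithms | algorithmsbook_Jeff_Erickson/peasant_multiplication/solution.py | peasant_multiplication
-- ===== SOURCE A (Python) =====
-- def peasant_multiplication(x, y):
--     prod = 0
--     while x > 0:
--         if x%2 != 0:
--             prod = prod + y
--         x = int(x / 2)
--         y = int(y + y)
--     return prod
-- ===== SOURCE B (Python) =====
-- def peasant_multiplication(x, y):
--     return x * y if x > 0 else 0
-- ===== Notes on version B (the rewrite author's own statement) =====
-- stated objective: simpler
-- what changed: Replaced the doubling/halving while-loop accumulating prod with the closed form x*y (0 for non-positive x), which is what the loop computes on the stated domain.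
import Mathlib
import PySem

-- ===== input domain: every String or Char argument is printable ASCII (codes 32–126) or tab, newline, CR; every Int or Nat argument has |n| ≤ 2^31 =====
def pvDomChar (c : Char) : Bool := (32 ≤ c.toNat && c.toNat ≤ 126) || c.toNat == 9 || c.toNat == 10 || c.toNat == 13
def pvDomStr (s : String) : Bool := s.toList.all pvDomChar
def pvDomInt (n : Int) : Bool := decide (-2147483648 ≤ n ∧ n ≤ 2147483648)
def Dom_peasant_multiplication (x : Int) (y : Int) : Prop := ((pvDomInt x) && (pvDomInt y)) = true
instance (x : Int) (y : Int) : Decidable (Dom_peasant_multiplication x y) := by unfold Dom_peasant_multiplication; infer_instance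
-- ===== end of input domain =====

-- B replaces A's doubling/halving loop by the closed form x*y (0 for non-positive x): simpler.


-- ===== PORT A =====
-- the while-loop: state (x, y, prod); the loop body only runs with x > 0, where
-- Python's int(x/2) equals x / 2 (Lean Int ediv = floor = truncation for positive x;
-- the float division is exact for |x| ≤ 2^31), and Python's x % 2 equals Lean's x % 2
-- (emod, same for positive modulus).
def pmLoopA (x y prod : Int) : Int :=
  if 0 < x then
    pmLoopA (x / 2) (y + y) (if x % 2 ≠ 0 then prod + y else prod)
  else prod
termination_by x.toNat
decreasing_by omega

def peasant_multiplication (x : Int) (y : Int) : Int := pmLoopA x y 0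

-- ===== PORT B =====
def peasant_multiplication_alt (x : Int) (y : Int) : Int := if 0 < x then x * y else 0

-- ===== PRECONDITION & SPEC =====
def Spec_peasant_multiplication (x : Int) (y : Int) (out : Int) : Prop := out = peasant_multiplication_alt x y
instance (x : Int) (y : Int) (out : Int) : Decidable (Spec_peasant_multiplication x y out) := by unfold Spec_peasant_multiplication; infer_instance

-- ===== CLAIM (what is proved, stated in full; the proofs are below) =====
def Claim_equal_peasant_multiplication : Prop := ∀ (x : Int) (y : Int), Dom_peasant_multiplication x y → Spec_peasant_multiplication x y (peasant_multiplication x y)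

-- ===== LEMMAS AND PROOFS =====

theorem pmLoopA_eq (x y prod : Int) :
    pmLoopA x y prod = prod + (if 0 < x then x * y else 0) := by
  rw [pmLoopA]
  by_cases hx : 0 < x
  · rw [if_pos hx, pmLoopA_eq (x / 2) (y + y) _]
    obtain ⟨q, r, hqr, hq2, hr01⟩ : ∃ q r, x = 2 * q + r ∧ x / 2 = q ∧ (r = 0 ∨ r = 1) :=
      ⟨x / 2, x % 2, by omega, rfl, by omega⟩
    rw [hq2, if_pos hx]
    rcases hr01 with hr | hr
    · have hmod : ¬ x % 2 ≠ 0 := by omega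
      have hqpos : 0 < q := by omega
      rw [if_neg hmod, if_pos hqpos, hqr, hr]
      ring
    · have hmod : x % 2 ≠ 0 := by omega
      rw [if_pos hmod, hqr, hr]
      by_cases hqpos : 0 < q
      · rw [if_pos hqpos]; ring
      · have hq0 : q = 0 := by omega
        rw [if_neg hqpos, hq0]; ring
  · rw [if_neg hx, if_neg hx]; ring
termination_by x.toNat
decreasing_by omega

-- ===== VERDICT (by name: the statement is the Claim_ definition above) =====
theorem peasant_multiplication_spec : Claim_equal_peasant_multiplication := by
  intro x y _
  unfold Spec_peasant_multiplication peasant_multiplication peasant_multiplication_alt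
  rw [pmLoopA_eq]; ring
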